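-- pv_equiv track=rewrite | github.com/demikaiser/AIAbalone | ai_evaluation_function_Challenger.py | single_marble_edge
-- ===== SOURCE A (Python) =====
-- def single_marble_edge(player, ally_pieces_locations, state):
--     # Check the side.
--     if player == 'black':
--         ally = 1
--         opponent = 2
--     elif player == 'white':
--         ally = 2
--         opponent = 1
--
--     edge_score = 0
--
--     for location in ally_pieces_locations:
--         x = location[0]
--         y = location[1]
--
--         if x == 0 and y > 3:
--             edge_score -= 5
--         if x == 1 and (y == 3 or y == 8):
--             edge_score -= 5
--         if x == 2 and (y == 2 or y == 8):
--             edge_score -= 5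
--         if x == 3 and (y == 1 or y == 8):
--             edge_score -= 5
--         if x == 4 and (y == 0 or y == 8):
--             edge_score -= 5
--         if x == 5 and (y == 0 or y == 7):
--             edge_score -= 5
--         if x == 6 and (y == 0 or y == 6):
--             edge_score -= 5
--         if x == 7 and (y == 0 or y == 5):
--             edge_score -= 5
--         if x == 8 and y < 5:
--             edge_score -= 5
--
--     return edge_score
-- ===== SOURCE B (Python) =====
-- # The seven finite penalized rows, flattened into the 14 concrete edge cells.
-- _EDGE_CELLS = [(1, 3), (1, 8), (2, 2), (2, 8), (3, 1), (3, 8), (4, 0), (4, 8),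
--                (5, 0), (5, 7), (6, 0), (6, 6), (7, 0), (7, 5)]
--
-- def single_marble_edge(player, ally_pieces_locations, state):
--     # Stage 1: index the positions by frequency.
--     freq = {}
--     for loc in ally_pieces_locations:
--         key = (loc[0], loc[1])
--         freq[key] = freq.get(key, 0) + 1
--     # Stage 2: 14 O(1) lookups for the finite edge cells.
--     hits = 0
--     for cell in _EDGE_CELLS:
--         hits += freq.get(cell, 0)
--     # Stage 3: the two unbounded inequality rows, counted explicitly.
--     for x, y in ally_pieces_locations:
--         if (x == 0 and y > 3) or (x == 8 and y < 5):
--             hits += 1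
--     return -5 * hits
-- ===== Notes on version B (the rewrite author's own statement) =====
-- stated objective: alternative
-- what changed: Instead of A's single pass applying nine if-branches to every piece, B builds a frequency dict of positions once, reads the penalty count for the seven finite rows off the index with 14 constant-time lookups, counts the two unbounded inequality rows (x==0,y>3 and x==8,y<5) in a separate explicit pass, and returns -5*hits; the unused player/ally/opponent/state logic is dropped.
import Mathlib
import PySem

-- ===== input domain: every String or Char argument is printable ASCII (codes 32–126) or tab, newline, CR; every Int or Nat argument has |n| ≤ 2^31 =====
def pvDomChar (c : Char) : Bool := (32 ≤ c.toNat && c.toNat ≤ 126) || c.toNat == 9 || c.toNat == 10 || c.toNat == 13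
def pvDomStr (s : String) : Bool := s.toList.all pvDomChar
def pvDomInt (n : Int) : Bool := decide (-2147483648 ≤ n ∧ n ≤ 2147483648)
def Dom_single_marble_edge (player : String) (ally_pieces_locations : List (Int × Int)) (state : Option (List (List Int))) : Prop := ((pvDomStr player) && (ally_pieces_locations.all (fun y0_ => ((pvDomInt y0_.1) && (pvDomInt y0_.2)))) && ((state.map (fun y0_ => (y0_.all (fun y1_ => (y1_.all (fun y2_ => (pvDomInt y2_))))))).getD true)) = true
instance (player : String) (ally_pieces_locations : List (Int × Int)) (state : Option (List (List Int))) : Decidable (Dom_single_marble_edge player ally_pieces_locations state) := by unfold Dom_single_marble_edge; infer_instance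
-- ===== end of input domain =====

-- B replaces A's single pass of nine per-piece if-branches by a staged algorithm: build a
-- frequency dict of positions, read the seven finite rows off it with 14 lookups, and count
-- the two unbounded inequality rows in a separate explicit pass; objective: alternative.
-- A's ally/opponent assignments are computed but never used, so they are not carried.

-- ===== PORT A =====
-- one loop-body step of A: the nine sequential ifs, each updating edge_score
def smeStepA (acc : Int) (loc : Int × Int) : Int :=
  let x := loc.1
  let y := loc.2
  let acc := if x = 0 ∧ y > 3 then acc - 5 else acc
  let acc := if x = 1 ∧ (y = 3 ∨ y = 8) then acc - 5 else acc
  let acc := if x = 2 ∧ (y = 2 ∨ y = 8) then acc - 5 else acc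
  let acc := if x = 3 ∧ (y = 1 ∨ y = 8) then acc - 5 else acc
  let acc := if x = 4 ∧ (y = 0 ∨ y = 8) then acc - 5 else acc
  let acc := if x = 5 ∧ (y = 0 ∨ y = 7) then acc - 5 else acc
  let acc := if x = 6 ∧ (y = 0 ∨ y = 6) then acc - 5 else acc
  let acc := if x = 7 ∧ (y = 0 ∨ y = 5) then acc - 5 else acc
  if x = 8 ∧ y < 5 then acc - 5 else acc

def single_marble_edge (player : String) (ally_pieces_locations : List (Int × Int)) (state : Option (List (List Int))) : Int :=
  -- A assigns ally/opponent from player and never uses them; the assignments raise nothing and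
  -- have no effect on the returned value, so they are not carried in the port
  ally_pieces_locations.foldl smeStepA 0

-- ===== PORT B =====
-- Source B's module-level _EDGE_CELLS list
def pvEdgeCells : List (Int × Int) :=
  [(1, 3), (1, 8), (2, 2), (2, 8), (3, 1), (3, 8), (4, 0), (4, 8),
   (5, 0), (5, 7), (6, 0), (6, 6), (7, 0), (7, 5)]

def single_marble_edge_alt (player : String) (ally_pieces_locations : List (Int × Int)) (state : Option (List (List Int))) : Int :=
  -- stage 1: freq[key] = freq.get(key, 0) + 1 over the positions
  let freq := ally_pieces_locations.foldl
    (fun d p => d.insert p (d.getD p 0 + 1)) (PySem.Dict.empty : PySem.Dict (Int × Int) Int)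
  -- stage 2: hits += freq.get(cell, 0) for the 14 finite edge cells
  let hits1 := pvEdgeCells.foldl (fun h c => h + freq.getD c 0) 0
  -- stage 3: the two unbounded inequality rows, counted over the positions
  let hits2 := ally_pieces_locations.foldl
    (fun h p => if (p.1 = 0 ∧ p.2 > 3) ∨ (p.1 = 8 ∧ p.2 < 5) then h + 1 else h) hits1
  (-5) * hits2

-- ===== PRECONDITION & SPEC =====
def Spec_single_marble_edge (player : String) (ally_pieces_locations : List (Int × Int)) (state : Option (List (List Int))) (out : Int) : Prop := out = single_marble_edge_alt player ally_pieces_locations state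
instance (player : String) (ally_pieces_locations : List (Int × Int)) (state : Option (List (List Int))) (out : Int) : Decidable (Spec_single_marble_edge player ally_pieces_locations state out) := by unfold Spec_single_marble_edge; infer_instance

-- ===== CLAIM (what is proved, stated in full; the proofs are below) =====
def Claim_equal_single_marble_edge : Prop := ∀ (player : String) (ally_pieces_locations : List (Int × Int)) (state : Option (List (List Int))), Dom_single_marble_edge player ally_pieces_locations state → Spec_single_marble_edge player ally_pieces_locations state (single_marble_edge player ally_pieces_locations state)

-- ===== LEMMAS AND PROOFS =====
-- the finite-cell predicate and the inequality-row predicate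
def pvMemCell (p : Int × Int) : Bool := decide (p ∈ pvEdgeCells)
def pvIneq (p : Int × Int) : Bool := decide ((p.1 = 0 ∧ p.2 > 3) ∨ (p.1 = 8 ∧ p.2 < 5))

-- one A-step subtracts 5 exactly once for a finite-cell hit or an inequality-row hit
theorem smeStepA_eq (acc : Int) (p : Int × Int) :
    smeStepA acc p =
      acc - 5 * ((if pvMemCell p then 1 else 0) + (if pvIneq p then 1 else 0)) := by
  obtain ⟨x, y⟩ := p
  simp only [smeStepA, pvMemCell, pvEdgeCells, pvIneq, List.mem_cons, List.not_mem_nil,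
    or_false, Prod.mk.injEq, decide_eq_true_eq]
  by_cases h0 : x = 0
  · subst h0; norm_num; split_ifs <;> omega
  · by_cases h1 : x = 1
    · subst h1; norm_num; split_ifs <;> omega
    · by_cases h2 : x = 2
      · subst h2; norm_num; split_ifs <;> omega
      · by_cases h3 : x = 3
        · subst h3; norm_num; split_ifs <;> omega
        · by_cases h4 : x = 4
          · subst h4; norm_num; split_ifs <;> omega
          · by_cases h5 : x = 5
            · subst h5; norm_num; split_ifs <;> omega
            · by_cases h6 : x = 6
              · subst h6; norm_num; split_ifs <;> omega
              · by_cases h7 : x = 7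
                · subst h7; norm_num; split_ifs <;> omega
                · by_cases h8 : x = 8
                  · subst h8; norm_num; split_ifs <;> omega
                  · simp [h0, h1, h2, h3, h4, h5, h6, h7, h8]

theorem foldl_smeStepA (l : List (Int × Int)) (acc : Int) :
    l.foldl smeStepA acc = acc - 5 * ((l.countP pvMemCell : Int) + (l.countP pvIneq : Int)) := by
  induction l generalizing acc with
  | nil => simp
  | cons h t ih =>
    rw [List.foldl_cons, ih, smeStepA_eq, List.countP_cons, List.countP_cons]
    by_cases h1 : pvMemCell h = true <;> by_cases h2 : pvIneq h = true <;>
      simp [h1, h2] <;> push_cast <;> try ring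

-- counting a disjunction of pointwise disjoint predicates splits into two counts
theorem countP_or_disjoint {α : Type} (p q : α → Bool) (l : List α)
    (h : ∀ x, ¬(p x = true ∧ q x = true)) :
    l.countP (fun x => p x || q x) = l.countP p + l.countP q := by
  induction l with
  | nil => simp
  | cons a t ih =>
    rw [List.countP_cons, List.countP_cons, List.countP_cons, ih]
    have := h a
    by_cases hp : p a = true <;> by_cases hq : q a = true <;> simp [hp, hq] at * <;> omega

-- summing l.count over a duplicate-free cell list counts membership
theorem sum_count_eq_countP (cs : List (Int × Int)) (hnd : cs.Nodup)
    (l : List (Int × Int)) :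
    (cs.map (fun c => l.count c)).sum = l.countP (fun p => decide (p ∈ cs)) := by
  induction cs with
  | nil => simp
  | cons c cs ih =>
    rcases List.nodup_cons.mp hnd with ⟨hc, hnd'⟩
    have hdisj : ∀ x : Int × Int, ¬((x == c) = true ∧ decide (x ∈ cs) = true) := by
      intro x ⟨hx1, hx2⟩
      rw [beq_iff_eq] at hx1
      subst hx1
      exact hc (of_decide_eq_true hx2)
    have hcong : l.countP (fun p => decide (p ∈ (c :: cs)))
        = l.countP (fun p => (p == c) || decide (p ∈ cs)) := by
      apply List.countP_congr
      intro x _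
      simp [List.mem_cons]
    rw [List.map_cons, List.sum_cons, hcong, countP_or_disjoint _ _ _ hdisj, ih hnd']
    rfl

-- sums of Nat counts cast to Int
theorem sum_map_intCast (cs : List (Int × Int)) (f : Int × Int → Nat) :
    (cs.map (fun c => (f c : Int))).sum = ((cs.map f).sum : Int) := by
  induction cs with
  | nil => simp
  | cons c t ih => simp [ih]

-- stage-2 fold: adds up freq.get(cell, 0) over the cells
theorem foldl_stage2 (freq : PySem.Dict (Int × Int) Int) (cs : List (Int × Int)) (acc : Int) :
    cs.foldl (fun h c => h + freq.getD c 0) acc = acc + (cs.map (fun c => freq.getD c 0)).sum := by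
  induction cs generalizing acc with
  | nil => simp
  | cons c t ih => rw [List.foldl_cons, ih, List.map_cons, List.sum_cons]; ring

-- stage-3 fold: adds the count of inequality-row pieces
theorem foldl_stage3 (l : List (Int × Int)) (acc : Int) :
    l.foldl (fun h p => if (p.1 = 0 ∧ p.2 > 3) ∨ (p.1 = 8 ∧ p.2 < 5) then h + 1 else h) acc
      = acc + (l.countP pvIneq : Int) := by
  induction l generalizing acc with
  | nil => simp
  | cons a t ih =>
    rw [List.foldl_cons, ih, List.countP_cons]
    by_cases hp : ((a.1 = 0 ∧ a.2 > 3) ∨ (a.1 = 8 ∧ a.2 < 5))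
    · simp only [pvIneq, decide_eq_true_eq, hp, if_true]
      push_cast; ring
    · simp only [pvIneq, decide_eq_true_eq, hp, if_false]
      push_cast; ring

-- B unrolled: -5 times (finite-cell hits + inequality-row hits)
theorem alt_eq (player : String) (l : List (Int × Int)) (state : Option (List (List Int))) :
    single_marble_edge_alt player l state
      = (-5) * ((l.countP pvMemCell : Int) + (l.countP pvIneq : Int)) := by
  show (-5 : Int) * (List.foldl
      (fun h p => if (p.1 = 0 ∧ p.2 > 3) ∨ (p.1 = 8 ∧ p.2 < 5) then h + 1 else h)
      (List.foldl
        (fun h c => h + (List.foldl (fun d p => d.insert p (d.getD p 0 + 1))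
          (PySem.Dict.empty : PySem.Dict (Int × Int) Int) l).getD c 0) 0 pvEdgeCells) l)
    = (-5) * ((l.countP pvMemCell : Int) + (l.countP pvIneq : Int))
  rw [foldl_stage3, foldl_stage2]
  have hgetD : ∀ c : Int × Int,
      (l.foldl (fun d p => d.insert p (d.getD p 0 + 1))
        (PySem.Dict.empty : PySem.Dict (Int × Int) Int)).getD c 0 = (l.count c : Int) := by
    intro c
    rw [PySem.Dict.getD_foldl_insert_add_one]
    simp
  have hmap : (pvEdgeCells.map (fun c =>
      (l.foldl (fun d p => d.insert p (d.getD p 0 + 1))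
        (PySem.Dict.empty : PySem.Dict (Int × Int) Int)).getD c 0))
      = pvEdgeCells.map (fun c => ((l.count c : Nat) : Int)) := by
    apply List.map_congr_left
    intro c _
    exact hgetD c
  rw [hmap, sum_map_intCast, sum_count_eq_countP pvEdgeCells (by decide) l]
  have : l.countP (fun p => decide (p ∈ pvEdgeCells)) = l.countP pvMemCell := by
    apply List.countP_congr
    intro x _
    simp [pvMemCell]
  rw [this]
  ring

-- ===== VERDICT (by name: the statement is the Claim_ definition above) =====
theorem single_marble_edge_spec : Claim_equal_single_marble_edge := by
  intro player locs state _
  unfold Spec_single_marble_edge single_marble_edge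
  rw [alt_eq, foldl_smeStepA]
  ring
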